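-- pv_equiv track=rewrite | github.com/kostyukova/python_learning | set_2/bridge_edges.py | create_rooted_spanning_tree
-- ===== SOURCE A (Python) =====
-- def create_rooted_spanning_tree(G, root):
--     S = {}
--     for xnode in G.keys():
--         if xnode not in S:
--             S[xnode] = {}
--         for ynode in G[xnode].keys():
--             if ynode not in S[xnode].keys():
--                 if reached (S, xnode, ynode):
--                     S[xnode][ynode] = 'red'
--                 else:
--                     S[xnode][ynode] = 'green'
--     return S
--
-- def reached(S, node1, node2):
--     reached = [node1]
--     openlist = [node1]
--     while len(openlist) > 0:
--         current = openlist.pop(0)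
--         if current in S:
--             for node in S[current].keys():
--                 if node not in reached:
--                     if node == node2:
--                         return True
--                     else:
--                         reached.append(node)
--                         openlist.append(node)
--     return False
-- ===== SOURCE B (Python) =====
-- def create_rooted_spanning_tree(G, root):
--     S = {}
--     for xnode, nbrs in G.items():
--         if xnode not in S:
--             S[xnode] = {}
--         for ynode in nbrs:
--             if ynode not in S[xnode]:
--                 S[xnode][ynode] = ('red' if ynode != xnode and ynode in reach_set(S, xnode)
--                                    else 'green')
--     return S
--
-- def reach_set(S, start):
--     reach = {start}
--     changed = True
--     while changed:
--         changed = False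
--         for u in list(reach):
--             for v in S.get(u, ()):
--                 if v not in reach:
--                     reach.add(v)
--                     changed = True
--     return reach
-- ===== Notes on version B (the rewrite author's own statement) =====
-- stated objective: alternative
-- what changed: Per-edge reachability is computed by saturating the whole reachable set to a fixpoint (repeated full passes that add successors until nothing changes) followed by a membership test, instead of A's early-exit BFS over a FIFO queue with reached/openlist lists.
import Mathlib
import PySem

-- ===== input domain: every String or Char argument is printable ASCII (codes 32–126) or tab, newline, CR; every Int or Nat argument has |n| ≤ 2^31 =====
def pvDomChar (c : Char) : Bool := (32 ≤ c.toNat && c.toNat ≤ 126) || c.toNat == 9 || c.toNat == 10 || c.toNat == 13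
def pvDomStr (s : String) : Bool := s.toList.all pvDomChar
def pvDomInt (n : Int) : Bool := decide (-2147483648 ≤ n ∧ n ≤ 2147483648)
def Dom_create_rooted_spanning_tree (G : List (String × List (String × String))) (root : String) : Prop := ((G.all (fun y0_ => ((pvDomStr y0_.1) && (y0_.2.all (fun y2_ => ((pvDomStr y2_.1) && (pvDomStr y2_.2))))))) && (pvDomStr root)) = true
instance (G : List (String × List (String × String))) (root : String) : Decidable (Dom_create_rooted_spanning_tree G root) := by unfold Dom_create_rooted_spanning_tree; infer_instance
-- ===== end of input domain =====

-- B replaces A's per-edge FIFO-queue BFS with a whole-set fixpoint saturation of the reachable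
-- set and a membership test (objective: alternative decomposition, similar cost).

-- ===== PORT A =====
-- A, transliterated: S is a dict of dicts built edge by edge; `reached` is the BFS while-loop
-- with `reached`/`openlist` lists (fuel is a totality guard only; it is proved sufficient below).
abbrev pvSD : Type := PySem.Dict String (PySem.Dict String String)

-- `if current in S: for node in S[current].keys()`
def pvSuccsA (S : pvSD) (c : String) : List String :=
  if S.contains c then ((S.get? c).getD PySem.Dict.empty).keys else []

-- the `for node in …` body of `reached` (none = `return True`)
def pvReachedInner (visited openlist : List String) (node2 : String) :
    List String → Option (List String × List String)
  | [] => some (visited, openlist)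
  | n :: ns =>
    if n ∈ visited then pvReachedInner visited openlist node2 ns
    else if n = node2 then none
    else pvReachedInner (visited ++ [n]) (openlist ++ [n]) node2 ns

-- the `while len(openlist) > 0` loop: pop from the front, scan successors, append new nodes
def pvReachedLoop (S : pvSD) (node2 : String) : Nat → List String → List String → Bool
  | 0, _, _ => false
  | _ + 1, _, [] => false
  | fuel + 1, visited, current :: rest =>
    match pvReachedInner visited rest node2 (pvSuccsA S current) with
    | none => true
    | some (v', q') => pvReachedLoop S node2 fuel v' q'

def pvReached (S : pvSD) (node1 node2 : String) : Bool :=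
  pvReachedLoop S node2 (2 * (node1 :: S.items.flatMap (fun p => p.2.keys)).length + 2)
    [node1] [node1]

-- `for ynode in G[xnode].keys(): …`
def pvAInner (x : String) : List String → pvSD → pvSD
  | [], S => S
  | y :: ys, S =>
    let cur := (S.get? x).getD PySem.Dict.empty
    if cur.contains y then pvAInner x ys S
    else if pvReached S x y then pvAInner x ys (S.insert x (cur.insert y "red"))
    else pvAInner x ys (S.insert x (cur.insert y "green"))

-- `for xnode in G.keys(): …`
def pvAOuter : List (String × PySem.Dict String String) → pvSD → pvSD
  | [], S => S
  | (x, nbrs) :: rest, S =>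
    let S0 := if S.contains x then S else S.insert x PySem.Dict.empty
    pvAOuter rest (pvAInner x nbrs.keys S0)

def create_rooted_spanning_tree (G : List (String × List (String × String))) (root : String) :
    List (String × List (String × String)) :=
  -- the association lists denote Python dicts (last value wins, first position kept)
  let Gd : pvSD := PySem.Dict.ofList (G.map (fun p => (p.1, PySem.Dict.ofList p.2)))
  (pvAOuter Gd.items PySem.Dict.empty).items.map (fun p => (p.1, p.2.items))

-- ===== PORT B =====
-- B, transliterated: `reach_set` saturates `reach` by repeated full passes until no change
-- (fuel is a totality guard only); an edge is red iff its head is in the reach set and ≠ tail.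

-- `S.get(u, ())`
def pvSuccsB (S : pvSD) (u : String) : List String :=
  match S.get? u with
  | some m => m.keys
  | none => []

-- `for v in S.get(u, ()): if v not in reach: reach.add(v); changed = True`
def pvReachInner (reach : PySem.Set String) (changed : Bool) :
    List String → PySem.Set String × Bool
  | [] => (reach, changed)
  | v :: vs =>
    if reach.contains v then pvReachInner reach changed vs
    else pvReachInner (PySem.Set.add reach v) true vs

-- `for u in list(reach): …`
def pvReachPass (S : pvSD) : List String → PySem.Set String → Bool → PySem.Set String × Bool
  | [], reach, changed => (reach, changed)
  | u :: us, reach, changed =>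
    let rc := pvReachInner reach changed (pvSuccsB S u)
    pvReachPass S us rc.1 rc.2

-- `while changed: …`
def pvReachLoop (S : pvSD) : Nat → PySem.Set String → PySem.Set String
  | 0, reach => reach
  | fuel + 1, reach =>
    let rc := pvReachPass S reach reach false  -- `list(reach)`: snapshot of the set
    if rc.2 then pvReachLoop S fuel rc.1 else rc.1

def pvReachSet (S : pvSD) (start : String) : PySem.Set String :=
  pvReachLoop S ((start :: S.items.flatMap (fun p => p.2.keys)).length + 1)
    (PySem.Set.ofList [start])

def pvBInner (x : String) : List String → pvSD → pvSD
  | [], S => S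
  | y :: ys, S =>
    let cur := (S.get? x).getD PySem.Dict.empty
    if cur.contains y then pvBInner x ys S
    else pvBInner x ys
      (S.insert x (cur.insert y
        (if (y != x) && (pvReachSet S x).contains y then "red" else "green")))

def pvBOuter : List (String × PySem.Dict String String) → pvSD → pvSD
  | [], S => S
  | (x, nbrs) :: rest, S =>
    let S0 := if S.contains x then S else S.insert x PySem.Dict.empty
    pvBOuter rest (pvBInner x nbrs.keys S0)

def create_rooted_spanning_tree_alt (G : List (String × List (String × String))) (root : String) :
    List (String × List (String × String)) :=
  let Gd : pvSD := PySem.Dict.ofList (G.map (fun p => (p.1, PySem.Dict.ofList p.2)))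
  (pvBOuter Gd.items PySem.Dict.empty).items.map (fun p => (p.1, p.2.items))

-- ===== PRECONDITION & SPEC =====
def Spec_create_rooted_spanning_tree (G : List (String × List (String × String))) (root : String) (out : List (String × List (String × String))) : Prop := out = create_rooted_spanning_tree_alt G root
instance (G : List (String × List (String × String))) (root : String) (out : List (String × List (String × String))) : Decidable (Spec_create_rooted_spanning_tree G root out) := by unfold Spec_create_rooted_spanning_tree; infer_instance

-- ===== CLAIM (what is proved, stated in full; the proofs are below) =====
def Claim_equal_create_rooted_spanning_tree : Prop := ∀ (G : List (String × List (String × String))) (root : String), Dom_create_rooted_spanning_tree G root → Spec_create_rooted_spanning_tree G root (create_rooted_spanning_tree G root)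

-- ===== LEMMAS AND PROOFS =====

-- the step relation of the partially built tree S, and reachability along it
def pvStep (S : pvSD) (u v : String) : Prop := v ∈ pvSuccsB S u
def pvReaches (S : pvSD) (u v : String) : Prop := Relation.ReflTransGen (pvStep S) u v

-- a finite universe containing every node the traversals can ever add
def pvUni (S : pvSD) (n1 : String) : List String := n1 :: S.items.flatMap (fun p => p.2.keys)

lemma succsA_eq (S : pvSD) (c : String) : pvSuccsA S c = pvSuccsB S c := by
  unfold pvSuccsA pvSuccsB
  rw [PySem.Dict.contains_eq_isSome_get?]
  rcases h : S.get? c with _ | m <;> simp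

lemma succ_sub_uni {S : pvSD} {u v : String} (h : v ∈ pvSuccsB S u) (n1 : String) :
    v ∈ pvUni S n1 := by
  unfold pvSuccsB at h
  rcases hg : S.get? u with _ | m
  · rw [hg] at h; simp at h
  · rw [hg] at h
    have hm := PySem.Dict.mem_items_of_get?_eq_some S hg
    exact List.mem_cons_of_mem _ (List.mem_flatMap.mpr ⟨(u, m), hm, h⟩)

lemma reach_mem_closed {S : pvSD} {V : List String} {n1 : String}
    (hcl : ∀ u ∈ V, ∀ w, w ∈ pvSuccsB S u → w ∈ V) (h1 : n1 ∈ V) {u : String}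
    (h : pvReaches S n1 u) : u ∈ V := by
  induction h with
  | refl => exact h1
  | tail _ hstep ih => exact hcl _ ih _ hstep

lemma filter_split (U : List String) (p q : String → Bool) :
    (U.filter p).length =
      (U.filter (fun z => p z && q z)).length + (U.filter (fun z => p z && !q z)).length := by
  induction U with
  | nil => simp
  | cons a t ih =>
    by_cases hp : p a <;> by_cases hq : q a <;> simp [hp, hq, ih] <;> omega

lemma count_drop {U V d : List String} (hd : d.Nodup) (hdU : ∀ z ∈ d, z ∈ U)
    (hdV : ∀ z ∈ d, z ∉ V) :
    (U.filter (fun z => decide (z ∉ V ++ d))).length + d.length ≤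
      (U.filter (fun z => decide (z ∉ V))).length := by
  have hfun : (fun z => decide (z ∉ V ++ d)) = (fun z => decide (z ∉ V) && !decide (z ∈ d)) := by
    funext z; by_cases h1 : z ∈ V <;> by_cases h2 : z ∈ d <;> simp [h1, h2]
  have hsplit := filter_split U (fun z => decide (z ∉ V)) (fun z => decide (z ∈ d))
  have hsub : d ⊆ U.filter (fun z => decide (z ∉ V) && decide (z ∈ d)) := by
    intro z hz
    exact List.mem_filter.mpr ⟨hdU z hz, by simp [hdV z hz, hz]⟩
  have hlen : d.length ≤ (U.filter (fun z => decide (z ∉ V) && decide (z ∈ d))).length :=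
    (List.subperm_of_subset hd hsub).length_le
  rw [hfun]
  omega

lemma inner_none {node2 : String} :
    ∀ (l V Q : List String), pvReachedInner V Q node2 l = none ↔ (node2 ∈ l ∧ node2 ∉ V) := by
  intro l
  induction l with
  | nil => intro V Q; simp [pvReachedInner]
  | cons n ns ih =>
    intro V Q
    by_cases h1 : n ∈ V
    · rw [pvReachedInner, if_pos h1, ih]
      constructor
      · rintro ⟨hm, hv⟩; exact ⟨List.mem_cons_of_mem _ hm, hv⟩
      · rintro ⟨hm, hv⟩
        rcases List.mem_cons.mp hm with h | h
        · exact absurd (h ▸ h1) hv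
        · exact ⟨h, hv⟩
    · by_cases h2 : n = node2
      · rw [pvReachedInner, if_neg h1, if_pos h2]
        simp [← h2, h1]
      · rw [pvReachedInner, if_neg h1, if_neg h2, ih]
        constructor
        · rintro ⟨hm, hv⟩
          rw [List.mem_append] at hv
          exact ⟨List.mem_cons_of_mem _ hm, fun hmem => hv (Or.inl hmem)⟩
        · rintro ⟨hm, hv⟩
          rcases List.mem_cons.mp hm with h | h
          · exact absurd h.symm h2
          · refine ⟨h, ?_⟩
            rw [List.mem_append]
            rintro (hm | hm)
            · exact hv hm
            · simp at hm; exact h2 (hm ▸ rfl)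

lemma inner_some {node2 : String} :
    ∀ (l V Q V' Q' : List String), pvReachedInner V Q node2 l = some (V', Q') →
      ∃ d, V' = V ++ d ∧ Q' = Q ++ d ∧ d.Nodup ∧
        (∀ z ∈ d, z ∈ l ∧ z ∉ V ∧ z ≠ node2) ∧ (∀ w ∈ l, w ∈ V') := by
  intro l
  induction l with
  | nil =>
    intro V Q V' Q' h
    rw [pvReachedInner] at h
    injection h with h
    injection h with h1 h2
    exact ⟨[], by simp [h1.symm], by simp [h2.symm], by simp, by simp, by simp⟩
  | cons n ns ih =>
    intro V Q V' Q' h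
    by_cases h1 : n ∈ V
    · rw [pvReachedInner, if_pos h1] at h
      obtain ⟨d, hV, hQ, hnd, hprop, hcov⟩ := ih V Q V' Q' h
      refine ⟨d, hV, hQ, hnd, ?_, ?_⟩
      · intro z hz
        obtain ⟨ha, hb, hc⟩ := hprop z hz
        exact ⟨List.mem_cons_of_mem _ ha, hb, hc⟩
      · intro w hw
        rcases List.mem_cons.mp hw with h' | h'
        · subst h'; rw [hV]; exact List.mem_append_left _ h1
        · exact hcov w h'
    · by_cases h2 : n = node2
      · rw [pvReachedInner, if_neg h1, if_pos h2] at h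
        exact absurd h (by simp)
      · rw [pvReachedInner, if_neg h1, if_neg h2] at h
        obtain ⟨d, hV, hQ, hnd, hprop, hcov⟩ := ih _ _ _ _ h
        refine ⟨n :: d, by simp [hV], by simp [hQ], ?_, ?_, ?_⟩
        · refine List.nodup_cons.mpr ⟨?_, hnd⟩
          intro hn
          have := (hprop n hn).2.1
          simp at this
        · intro z hz
          rcases List.mem_cons.mp hz with h' | h'
          · subst h'; exact ⟨List.mem_cons_self, h1, h2⟩
          · obtain ⟨ha, hb, hc⟩ := hprop z h'
            rw [List.mem_append] at hb
            exact ⟨List.mem_cons_of_mem _ ha, fun hm => hb (Or.inl hm), hc⟩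
        · intro w hw
          rcases List.mem_cons.mp hw with h' | h'
          · subst h'; rw [hV]; exact List.mem_append_left _ (by simp)
          · exact hcov w h' 

lemma closed_no_path {S : pvSD} {V : List String} {n1 node2 : String}
    (hcl : ∀ u ∈ V, ∀ w, w ∈ pvSuccsB S u → w ∈ V) (h1 : n1 ∈ V)
    (hne2 : ∀ v ∈ V, v = n1 ∨ v ≠ node2) :
    ¬ ∃ u, pvReaches S n1 u ∧ node2 ∈ pvSuccsB S u ∧ node2 ≠ n1 := by
  rintro ⟨u, hru, hs, hne⟩
  have hu : u ∈ V := reach_mem_closed hcl h1 hru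
  have h2 : node2 ∈ V := hcl u hu node2 hs
  rcases hne2 _ h2 with h | h
  · exact hne h
  · exact h rfl

lemma loop_correct (S : pvSD) (n1 node2 : String) :
    ∀ (fuel : Nat) (V Q : List String), V.Nodup → (∀ q ∈ Q, q ∈ V) → n1 ∈ V →
      (∀ v ∈ V, pvReaches S n1 v) → (∀ v ∈ V, v = n1 ∨ v ≠ node2) →
      (∀ u ∈ V, u ∉ Q → ∀ w ∈ pvSuccsB S u, w ∈ V) →
      Q.length + 2 * ((pvUni S n1).filter (fun z => decide (z ∉ V))).length ≤ fuel →
      (pvReachedLoop S node2 fuel V Q = true ↔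
        ∃ u, pvReaches S n1 u ∧ node2 ∈ pvSuccsB S u ∧ node2 ≠ n1) := by
  intro fuel
  induction fuel with
  | zero =>
    intro V Q hnd hQV h1 hreach hne2 hcl hfuel
    have hQ : Q = [] := by
      cases Q with
      | nil => rfl
      | cons a t => exfalso; simp only [List.length_cons] at hfuel; omega
    subst hQ
    rw [show pvReachedLoop S node2 0 V [] = false from rfl]
    simp only [Bool.false_eq_true, false_iff]
    exact closed_no_path (fun u hu w hw => hcl u hu (by simp) w hw) h1 hne2
  | succ fuel ih =>
    intro V Q hnd hQV h1 hreach hne2 hcl hfuel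
    cases Q with
    | nil =>
      rw [show pvReachedLoop S node2 (fuel + 1) V [] = false from rfl]
      simp only [Bool.false_eq_true, false_iff]
      exact closed_no_path (fun u hu w hw => hcl u hu (by simp) w hw) h1 hne2
    | cons c rest =>
      have hcV : c ∈ V := hQV c List.mem_cons_self
      rcases hmatch : pvReachedInner V rest node2 (pvSuccsA S c) with _ | ⟨V', Q'⟩
      · have hn := (inner_none _ _ _).mp hmatch
        rw [succsA_eq] at hn
        have hT : pvReachedLoop S node2 (fuel + 1) V (c :: rest) = true := by
          rw [pvReachedLoop, hmatch]
        rw [hT]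
        simp only [true_iff]
        exact ⟨c, hreach c hcV, hn.1, fun he => hn.2 (he ▸ h1)⟩
      · obtain ⟨d, hV', hQ', hdnd, hdprop, hcov⟩ := inner_some _ _ _ _ _ hmatch
        rw [succsA_eq] at hdprop hcov
        have hstep : pvReachedLoop S node2 (fuel + 1) V (c :: rest) =
            pvReachedLoop S node2 fuel V' Q' := by
          rw [pvReachedLoop, hmatch]
        rw [hstep]
        subst hV' hQ'
        apply ih (V ++ d) (rest ++ d)
        · exact hnd.append hdnd (fun z hzV hzd => (hdprop z hzd).2.1 hzV)
        · intro q hq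
          rcases List.mem_append.mp hq with h | h
          · exact List.mem_append_left _ (hQV q (List.mem_cons_of_mem _ h))
          · exact List.mem_append_right _ h
        · exact List.mem_append_left _ h1
        · intro v hv
          rcases List.mem_append.mp hv with h | h
          · exact hreach v h
          · exact Relation.ReflTransGen.tail (hreach c hcV) ((hdprop v h).1)
        · intro v hv
          rcases List.mem_append.mp hv with h | h
          · exact hne2 v h
          · exact Or.inr (hdprop v h).2.2
        · intro u hu hnq w hw
          rcases List.mem_append.mp hu with h | h
          · by_cases hc : u = c
            · subst hc; exact hcov w hw
            · have hnc : u ∉ c :: rest := by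
                intro hm
                rcases List.mem_cons.mp hm with h' | h'
                · exact hc h'
                · exact hnq (List.mem_append_left _ h')
              exact List.mem_append_left _ (hcl u h hnc w hw)
          · exact absurd (List.mem_append_right rest h) hnq
        · have hcd := count_drop (U := pvUni S n1) hdnd
            (fun z hz => succ_sub_uni ((hdprop z hz).1) n1) (fun z hz => (hdprop z hz).2.1)
          simp only [List.length_append, List.length_cons] at hfuel ⊢
          omega

lemma last_step_iff (S : pvSD) (x y : String) :
    (∃ u, pvReaches S x u ∧ y ∈ pvSuccsB S u ∧ y ≠ x) ↔ (pvReaches S x y ∧ y ≠ x) := by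
  constructor
  · rintro ⟨u, hru, hs, hne⟩
    exact ⟨Relation.ReflTransGen.tail hru hs, hne⟩
  · rintro ⟨hr, hne⟩
    rcases Relation.ReflTransGen.cases_tail hr with h | ⟨u, hru, hstep⟩
    · exact absurd h hne
    · exact ⟨u, hru, hstep, hne⟩

lemma reachedA_iff (S : pvSD) (x y : String) :
    pvReached S x y = true ↔ (pvReaches S x y ∧ y ≠ x) := by
  unfold pvReached
  have h := loop_correct S x y (2 * (x :: S.items.flatMap (fun p => p.2.keys)).length + 2) [x] [x]
    (by simp) (by simp) (by simp)
    (by intro v hv; simp at hv; subst hv; exact Relation.ReflTransGen.refl)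
    (by intro v hv; simp at hv; exact Or.inl hv)
    (by intro u hu hnq; exact absurd hu hnq)
    (by
      have hle := List.length_filter_le (fun z => decide (z ∉ ([x] : List String))) (pvUni S x)
      simp only [pvUni, List.length_cons, List.length_nil] at hle ⊢
      omega)
  rw [h]
  exact last_step_iff S x y

lemma innerB {reach' : PySem.Set String} {c' : Bool} :
    ∀ (l : List String) (reach : PySem.Set String) (ch : Bool),
      pvReachInner reach ch l = (reach', c') →
      ∃ d, reach' = reach ++ d ∧ d.Nodup ∧ (∀ z ∈ d, z ∈ l ∧ z ∉ reach) ∧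
        (∀ w ∈ l, w ∈ reach') ∧ c' = (ch || !d.isEmpty) := by
  intro l
  induction l with
  | nil =>
    intro reach ch h
    rw [pvReachInner] at h
    injection h with h1 h2
    exact ⟨[], by simp [← h1], by simp, by simp, by simp, by simp [← h2]⟩
  | cons v vs ih =>
    intro reach ch h
    by_cases hv : reach.contains v
    · rw [pvReachInner, if_pos hv] at h
      obtain ⟨d, h1, h2, h3, h4, h5⟩ := ih _ _ h
      have hvm : v ∈ reach := by simpa [PySem.Set.contains] using hv
      refine ⟨d, h1, h2, ?_, ?_, h5⟩
      · intro z hz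
        obtain ⟨ha, hb⟩ := h3 z hz
        exact ⟨List.mem_cons_of_mem _ ha, hb⟩
      · intro w hw
        rcases List.mem_cons.mp hw with h' | h'
        · subst h'; rw [h1]; exact List.mem_append_left _ hvm
        · exact h4 w h'
    · rw [pvReachInner, if_neg hv] at h
      have hvm : v ∉ reach := by simpa [PySem.Set.contains] using hv
      have hadd : PySem.Set.add reach v = reach ++ [v] := by
        simp [PySem.Set.add, hvm]
      rw [hadd] at h
      obtain ⟨d, h1, h2, h3, h4, h5⟩ := ih _ _ h
      refine ⟨v :: d, by simp [h1], ?_, ?_, ?_, ?_⟩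
      · refine List.nodup_cons.mpr ⟨fun hvd => ?_, h2⟩
        have := (h3 v hvd).2
        simp at this
      · intro z hz
        rcases List.mem_cons.mp hz with h' | h'
        · subst h'; exact ⟨List.mem_cons_self, hvm⟩
        · obtain ⟨ha, hb⟩ := h3 z h'
          exact ⟨List.mem_cons_of_mem _ ha, fun hz' => hb (List.mem_append_left _ hz')⟩
      · intro w hw
        rcases List.mem_cons.mp hw with h' | h'
        · subst h'; rw [h1]
          exact List.mem_append_left _ (List.mem_append_right _ (by simp))
        · exact h4 w h'
      · rw [h5]; simp

lemma passB {S : pvSD} {reach' : PySem.Set String} {c' : Bool} :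
    ∀ (snap : List String) (reach : PySem.Set String) (ch : Bool),
      pvReachPass S snap reach ch = (reach', c') →
      ∃ d, reach' = reach ++ d ∧ d.Nodup ∧
        (∀ z ∈ d, (∃ u ∈ snap, z ∈ pvSuccsB S u) ∧ z ∉ reach) ∧
        (∀ u ∈ snap, ∀ w ∈ pvSuccsB S u, w ∈ reach') ∧ c' = (ch || !d.isEmpty) := by
  intro snap
  induction snap with
  | nil =>
    intro reach ch h
    rw [pvReachPass] at h
    injection h with h1 h2
    exact ⟨[], by simp [← h1], by simp, by simp, by simp, by simp [← h2]⟩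
  | cons u us ih =>
    intro reach ch h
    rw [pvReachPass] at h
    rcases hrc : pvReachInner reach ch (pvSuccsB S u) with ⟨r1, c1⟩
    rw [hrc] at h
    dsimp only at h
    obtain ⟨d1, a1, a2, a3, a4, a5⟩ := innerB _ _ _ hrc
    obtain ⟨d2, b1, b2, b3, b4, b5⟩ := ih _ _ h
    refine ⟨d1 ++ d2, by simp [b1, a1], ?_, ?_, ?_, ?_⟩
    · refine a2.append b2 (fun z hz1 hz2 => ?_)
      exact (b3 z hz2).2 (a1 ▸ List.mem_append_right _ hz1)
    · intro z hz
      rcases List.mem_append.mp hz with h' | h'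
      · obtain ⟨hl, hr⟩ := a3 z h'
        exact ⟨⟨u, List.mem_cons_self, hl⟩, hr⟩
      · obtain ⟨⟨u', hu', hsu⟩, hr⟩ := b3 z h'
        exact ⟨⟨u', List.mem_cons_of_mem _ hu', hsu⟩,
          fun hm => hr (a1 ▸ List.mem_append_left _ hm)⟩
    · intro u' hu' w hw
      rcases List.mem_cons.mp hu' with h' | h'
      · subst h'; rw [b1]; exact List.mem_append_left _ (a4 w hw)
      · exact b4 u' h' w hw
    · rw [b5, a5]; cases ch <;> cases d1 <;> cases d2 <;> simp

lemma loopB (S : pvSD) (x : String) :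
    ∀ (fuel : Nat) (r : PySem.Set String), List.Nodup r → x ∈ r →
      (∀ v ∈ r, pvReaches S x v) →
      ((pvUni S x).filter (fun z => decide (z ∉ r))).length + 1 ≤ fuel →
      ∀ y, (y ∈ pvReachLoop S fuel r ↔ pvReaches S x y) := by
  intro fuel
  induction fuel with
  | zero => intro r _ _ _ hfuel y; exact absurd hfuel (by omega)
  | succ fuel ih =>
    intro r hnd hx hreach hfuel y
    rcases hp : pvReachPass S r r false with ⟨r', c'⟩
    rw [pvReachLoop, hp]
    dsimp only
    obtain ⟨d, b1, b2, b3, b4, b5⟩ := passB _ _ _ hp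
    rw [Bool.false_or] at b5
    cases hd : d with
    | nil =>
      subst hd
      have hr' : r' = r := by simpa using b1
      have hc' : c' = false := by rw [b5]; rfl
      rw [hc', if_neg (by simp), hr']
      constructor
      · exact hreach y
      · intro hry
        exact reach_mem_closed
          (fun u hu w hw => by have := b4 u hu w hw; rwa [hr'] at this) hx hry
    | cons z zs =>
      subst hd
      have hc' : c' = true := by rw [b5]; rfl
      rw [hc', if_pos rfl]
      apply ih r'
      · rw [b1]; exact hnd.append b2 (fun a ha1 ha2 => (b3 a ha2).2 ha1)
      · rw [b1]; exact List.mem_append_left _ hx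
      · intro v hv
        rw [b1] at hv
        rcases List.mem_append.mp hv with h | h
        · exact hreach v h
        · obtain ⟨⟨u, hu, hsu⟩, _⟩ := b3 v h
          exact Relation.ReflTransGen.tail (hreach u hu) hsu
      · have hcd := count_drop (U := pvUni S x) (V := r) (d := z :: zs) b2
          (fun a ha => by obtain ⟨⟨u, _, hsu⟩, _⟩ := b3 a ha; exact succ_sub_uni hsu x)
          (fun a ha => (b3 a ha).2)
        rw [b1]
        simp only [List.length_cons] at hcd hfuel ⊢
        omega

lemma reachB_mem (S : pvSD) (x y : String) : y ∈ pvReachSet S x ↔ pvReaches S x y := by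
  unfold pvReachSet
  have h0 : PySem.Set.ofList [x] = [x] := rfl
  rw [h0]
  exact loopB S x _ [x] (by simp) (by simp)
    (by intro v hv; simp at hv; subst hv; exact Relation.ReflTransGen.refl)
    (by
      have hle := List.length_filter_le (fun z => decide (z ∉ ([x] : List String))) (pvUni S x)
      simp only [pvUni, List.length_cons] at hle ⊢
      omega) y

lemma edge_eq (S : pvSD) (x y : String) :
    pvReached S x y = ((y != x) && (pvReachSet S x).contains y) := by
  have hA := reachedA_iff S x y
  have hB := reachB_mem S x y
  have hmem : (pvReachSet S x).contains y = true ↔ y ∈ pvReachSet S x := by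
    simp [PySem.Set.contains]
  have hRHS : ((y != x) && (pvReachSet S x).contains y) = true ↔ (pvReaches S x y ∧ y ≠ x) := by
    rw [Bool.and_eq_true, bne_iff_ne]
    constructor
    · rintro ⟨h1, h2⟩
      exact ⟨hB.mp (hmem.mp h2), h1⟩
    · rintro ⟨hr, hne⟩
      exact ⟨hne, hmem.mpr (hB.mpr hr)⟩
  by_cases h : pvReaches S x y ∧ y ≠ x
  · rw [hA.mpr h, hRHS.mpr h]
  · have h1 : pvReached S x y = false := by
      cases hval : pvReached S x y
      · rfl
      · exact absurd (hA.mp hval) h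
    have h2 : ((y != x) && (pvReachSet S x).contains y) = false := by
      cases hval : ((y != x) && (pvReachSet S x).contains y)
      · rfl
      · exact absurd (hRHS.mp hval) h
    rw [h1, h2]

lemma inner_eq (x : String) (ys : List String) : ∀ S : pvSD, pvAInner x ys S = pvBInner x ys S := by
  induction ys with
  | nil => intro S; rfl
  | cons y ys ih =>
    intro S
    simp only [pvAInner, pvBInner, edge_eq]
    by_cases hcon : ((S.get? x).getD PySem.Dict.empty).contains y
    · simp [hcon, ih]
    · cases hb : ((y != x) && (pvReachSet S x).contains y) <;> simp [hcon, ih]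

lemma outer_eq : ∀ (l : List (String × PySem.Dict String String)) (S : pvSD),
    pvAOuter l S = pvBOuter l S := by
  intro l
  induction l with
  | nil => intro S; rfl
  | cons p rest ih =>
    intro S
    obtain ⟨x, nbrs⟩ := p
    simp only [pvAOuter, pvBOuter, inner_eq, ih]

-- ===== VERDICT (by name: the statement is the Claim_ definition above) =====
theorem create_rooted_spanning_tree_spec : Claim_equal_create_rooted_spanning_tree := by
  intro G root _
  unfold Spec_create_rooted_spanning_tree create_rooted_spanning_tree create_rooted_spanning_tree_alt
  simp only [outer_eq]
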